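-- pv_equiv track=rewrite | github.com/juzi5201314/antigravity-workspace-template | engine/antigravity_engine/hub/refresh_pipeline.py | _aggregate_states
-- ===== SOURCE A (Python) =====
-- def _aggregate_states(
--     states: list[str],
--     skipped_state: str = "success",
-- ) -> str:
--     """Aggregate a list of refresh states into a single health status.
--
--     Args:
--         states: Stage or module states.
--         skipped_state: Replacement state to use for ``skipped`` entries.
--
--     Returns:
--         Aggregate state.
--     """
--     normalized = [
--         skipped_state if state == "skipped" else state
--         for state in states
--         if state
--     ]
--     if not normalized:
--         return skipped_state
--     if "failed" in normalized:
--         return "failed"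
--     if "partial" in normalized:
--         return "partial"
--     if "success" in normalized:
--         return "success"
--     return skipped_state
-- ===== SOURCE B (Python) =====
-- _RANK = {"failed": 3, "partial": 2, "success": 1}
-- _NAME = {3: "failed", 2: "partial", 1: "success"}
--
--
-- def _aggregate_states(
--     states: list[str],
--     skipped_state: str = "success",
-- ) -> str:
--     best = max(
--         (_RANK.get(skipped_state if state == "skipped" else state, 0)
--          for state in states if state),
--         default=-1,
--     )
--     return _NAME.get(best, skipped_state)
-- ===== Notes on version B (the rewrite author's own statement) =====
-- stated objective: alternative
-- what changed: Replaces A's build-normalized-list-plus-three-membership-scans with a numeric severity encoding: map each non-empty state to a rank (failed=3, partial=2, success=1, other=0), max-reduce the ranks in one pass, and decode the maximum back to a state name.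
import Mathlib
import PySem

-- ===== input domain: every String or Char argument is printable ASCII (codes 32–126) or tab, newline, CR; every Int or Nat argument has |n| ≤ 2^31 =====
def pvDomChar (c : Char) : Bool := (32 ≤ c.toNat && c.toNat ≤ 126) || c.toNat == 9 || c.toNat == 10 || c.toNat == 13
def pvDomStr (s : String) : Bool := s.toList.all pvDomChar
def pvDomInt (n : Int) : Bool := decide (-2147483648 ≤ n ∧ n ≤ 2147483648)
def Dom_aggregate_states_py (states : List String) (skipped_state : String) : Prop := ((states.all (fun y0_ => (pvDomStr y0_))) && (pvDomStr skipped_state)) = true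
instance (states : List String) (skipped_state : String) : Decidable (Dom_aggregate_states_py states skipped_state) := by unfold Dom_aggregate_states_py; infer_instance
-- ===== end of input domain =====

-- ===== PORT A =====
-- B replaces the normalized-list-plus-membership-scans with a numeric severity
-- max-reduce and a decode of the maximum ("alternative", not claimed faster).
-- A's intermediate list comprehension
def aggNorm (skip : String) (l : List String) : List String :=
  (l.filter (fun st => st ≠ "")).map (fun st => if st = "skipped" then skip else st)

def aggregate_states_py (states : List String) (skipped_state : String) : String :=
  let normalized := aggNorm skipped_state states
  if normalized.isEmpty then skipped_state
  else if normalized.contains "failed" then "failed"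
  else if normalized.contains "partial" then "partial"
  else if normalized.contains "success" then "success"
  else skipped_state

-- ===== PORT B =====
-- Source B's _RANK lookup: severity rank of a (normalized) state
def aggRank (s : String) : Int :=
  if s = "failed" then 3 else if s = "partial" then 2 else if s = "success" then 1 else 0

-- Source B's max(... generator ..., default=-1): one fold over states
def aggregate_states_py_alt (states : List String) (skipped_state : String) : String :=
  let best := states.foldl
    (fun b state => if state = "" then b
                    else max b (aggRank (if state = "skipped" then skipped_state else state)))
    (-1 : Int)
  -- Source B's _NAME.get(best, skipped_state)
  if best = 3 then "failed"
  else if best = 2 then "partial"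
  else if best = 1 then "success"
  else skipped_state

-- ===== PRECONDITION & SPEC =====
def Spec_aggregate_states_py (states : List String) (skipped_state : String) (out : String) : Prop := out = aggregate_states_py_alt states skipped_state
instance (states : List String) (skipped_state : String) (out : String) : Decidable (Spec_aggregate_states_py states skipped_state out) := by unfold Spec_aggregate_states_py; infer_instance

-- ===== CLAIM (what is proved, stated in full; the proofs are below) =====
def Claim_equal_aggregate_states_py : Prop := ∀ (states : List String) (skipped_state : String), Dom_aggregate_states_py states skipped_state → Spec_aggregate_states_py states skipped_state (aggregate_states_py states skipped_state)

-- ===== LEMMAS AND PROOFS =====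
-- the value A's branch chain keys on, written as one integer (matches B's ranks)
def aggM (skip : String) (l : List String) : Int :=
  if (aggNorm skip l).contains "failed" then 3
  else if (aggNorm skip l).contains "partial" then 2
  else if (aggNorm skip l).contains "success" then 1
  else if (aggNorm skip l).isEmpty then -1 else 0

theorem aggM_bounds (skip : String) (l : List String) : -1 ≤ aggM skip l ∧ aggM skip l ≤ 3 := by
  unfold aggM; split_ifs <;> omega

theorem aggNorm_cons_empty (skip : String) (xs : List String) :
    aggNorm skip ("" :: xs) = aggNorm skip xs := by
  simp [aggNorm]

set_option maxHeartbeats 1000000 in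
theorem aggM_cons (skip : String) (x : String) (xs : List String) (hx : x ≠ "") :
    aggM skip (x :: xs) = max (aggRank (if x = "skipped" then skip else x)) (aggM skip xs) := by
  have hnorm : aggNorm skip (x :: xs)
      = (if x = "skipped" then skip else x) :: aggNorm skip xs := by
    simp [aggNorm, hx]
  unfold aggM
  rw [hnorm]
  generalize (if x = "skipped" then skip else x) = s
  cases hcf : (aggNorm skip xs).contains "failed" <;>
  cases hcp : (aggNorm skip xs).contains "partial" <;>
  cases hcs : (aggNorm skip xs).contains "success" <;>
  cases hce : (aggNorm skip xs).isEmpty <;>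
  ( by_cases h1 : s = "failed"
    · subst h1; simp_all [aggRank]
    · by_cases h2 : s = "partial"
      · subst h2; simp_all [aggRank]
      · by_cases h3 : s = "success"
        · subst h3; simp_all [aggRank]
        · simp_all [aggRank, Ne.symm h1, Ne.symm h2, Ne.symm h3] )

theorem agg_fold (skip : String) (l : List String) (b : Int) (hb0 : -1 ≤ b) :
    l.foldl
      (fun b state => if state = "" then b
                      else max b (aggRank (if state = "skipped" then skip else state)))
      b = max b (aggM skip l) := by
  induction l generalizing b with
  | nil => simp [aggM, aggNorm]; omega
  | cons x xs ih =>
    by_cases hx : x = ""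
    · subst hx
      simp only [List.foldl_cons, if_true]
      rw [ih b hb0]
      unfold aggM
      rw [aggNorm_cons_empty]
    · have hr : (0 : Int) ≤ aggRank (if x = "skipped" then skip else x) := by
        unfold aggRank; split_ifs <;> omega
      simp only [List.foldl_cons, if_neg hx]
      rw [ih _ (by omega), aggM_cons skip x xs hx]
      omega

-- ===== VERDICT (by name: the statement is the Claim_ definition above) =====
theorem aggregate_states_py_spec : Claim_equal_aggregate_states_py := by
  intro states skipped_state _
  unfold Spec_aggregate_states_py aggregate_states_py aggregate_states_py_alt
  rw [agg_fold skipped_state states (-1) (by norm_num)]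
  have hmax : max (-1 : Int) (aggM skipped_state states) = aggM skipped_state states := by
    have := aggM_bounds skipped_state states; omega
  rw [hmax]
  by_cases hf : "failed" ∈ aggNorm skipped_state states
  · have hne : aggNorm skipped_state states ≠ [] := by
      intro h; rw [h] at hf; exact (List.not_mem_nil hf)
    simp [aggM, hf, List.isEmpty_iff, hne]
  · by_cases hp : "partial" ∈ aggNorm skipped_state states
    · have hne : aggNorm skipped_state states ≠ [] := by
        intro h; rw [h] at hp; exact (List.not_mem_nil hp)
      simp [aggM, hf, hp, List.isEmpty_iff, hne]
    · by_cases hs : "success" ∈ aggNorm skipped_state states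
      · have hne : aggNorm skipped_state states ≠ [] := by
          intro h; rw [h] at hs; exact (List.not_mem_nil hs)
        simp [aggM, hf, hp, hs, List.isEmpty_iff, hne]
      · by_cases he : aggNorm skipped_state states = []
        · simp [aggM, he]
        · simp [aggM, hf, hp, hs, List.isEmpty_iff, he]
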